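-- pv_equiv track=rewrite | github.com/kaeli-byte/interviews-v2 | backend/api/profiles/service.py | _has_resume_detail
-- ===== SOURCE A (Python) =====
-- def _has_resume_detail(extracted: dict) -> bool:
--     experience = extracted.get("experience", []) or []
--     education = extracted.get("education", []) or []
--
--     experience_has_detail = any(
--         isinstance(item, dict) and (item.get("title") or item.get("company") or item.get("description"))
--         for item in experience
--     )
--     education_has_detail = any(
--         isinstance(item, dict) and (item.get("degree") or item.get("school") or item.get("field_of_study"))
--         for item in education
--     )
--     return experience_has_detail or education_has_detail
-- ===== SOURCE B (Python) =====
-- def _has_resume_detail(extracted: dict) -> bool: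
--     wanted = {
--         "experience": ("title", "company", "description"),
--         "education": ("degree", "school", "field_of_study"),
--     }
--     for name, items in extracted.items():
--         keys = wanted.get(name)
--         if keys is None:
--             continue
--         for item in (items or []):
--             if isinstance(item, dict):
--                 for k, v in item.items():
--                     if k in keys and v:
--                         return True
--     return False
-- ===== Notes on version B (the rewrite author's own statement) =====
-- stated objective: alternative
-- what changed: Instead of fetching the two sections by key and probing each item with three get() lookups, B makes one pass over the dict's own items(), and for each item iterates that item's own (key, value) pairs, testing key membership in a wanted-key table - the get() probes disappear entirely.
import Mathlib
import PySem

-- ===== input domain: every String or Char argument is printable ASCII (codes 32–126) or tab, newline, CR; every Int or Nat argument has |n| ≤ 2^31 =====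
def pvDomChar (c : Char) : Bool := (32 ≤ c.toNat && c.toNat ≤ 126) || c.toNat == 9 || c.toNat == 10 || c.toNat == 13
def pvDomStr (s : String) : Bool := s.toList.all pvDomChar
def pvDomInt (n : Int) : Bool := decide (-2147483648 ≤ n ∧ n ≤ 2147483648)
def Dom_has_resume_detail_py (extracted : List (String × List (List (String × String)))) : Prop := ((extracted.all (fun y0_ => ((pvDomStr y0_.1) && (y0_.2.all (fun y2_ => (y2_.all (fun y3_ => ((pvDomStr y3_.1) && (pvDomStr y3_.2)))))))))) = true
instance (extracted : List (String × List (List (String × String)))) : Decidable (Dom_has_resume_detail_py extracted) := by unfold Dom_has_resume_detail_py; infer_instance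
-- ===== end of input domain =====

-- B replaces A's key-probing (fetch the two sections with get, probe three fixed keys per item)
-- by one pass over the dict's own items with an inner scan of each item's own (key, value) pairs
-- against a wanted-key table; objective: alternative (same cost, no get() probes).

-- ===== PORT A =====
-- Python truthiness of item.get(k): a present, non-empty string
def pvTruthy (o : Option String) : Bool :=
  match o with
  | none => false
  | some s => !(s == "")

def has_resume_detail_py (extracted : List (String × List (List (String × String)))) : Bool :=
  let experience := (PySem.Dict.mk extracted).getD "experience" []
  let education := (PySem.Dict.mk extracted).getD "education" []
  let experience_has_detail := experience.any (fun item =>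
    pvTruthy ((PySem.Dict.mk item).get? "title") || pvTruthy ((PySem.Dict.mk item).get? "company") || pvTruthy ((PySem.Dict.mk item).get? "description"))
  let education_has_detail := education.any (fun item =>
    pvTruthy ((PySem.Dict.mk item).get? "degree") || pvTruthy ((PySem.Dict.mk item).get? "school") || pvTruthy ((PySem.Dict.mk item).get? "field_of_study"))
  experience_has_detail || education_has_detail

-- ===== PORT B =====
-- wanted = {"experience": (...), "education": (...)}
def pvWanted : PySem.Dict String (List String) :=
  PySem.Dict.mk
    [("experience", ["title", "company", "description"]),
     ("education", ["degree", "school", "field_of_study"])]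

-- one pass over extracted.items(); inner loops over the item's own pairs (early return = any)
def has_resume_detail_py_alt (extracted : List (String × List (List (String × String)))) : Bool :=
  extracted.any (fun e =>
    match pvWanted.get? e.1 with
    | none => false
    | some keys =>
      e.2.any (fun item => item.any (fun p => keys.contains p.1 && !(p.2 == ""))))

-- ===== PRECONDITION & SPEC =====
-- Pre_ requires unique keys in the outer mapping and within each item — automatic for every
-- Python dict — so it excludes only association lists that no Python input to A can produce.
def Pre_has_resume_detail_py (extracted : List (String × List (List (String × String)))) : Prop :=
  (extracted.map Prod.fst).Nodup ∧ ∀ e ∈ extracted, ∀ item ∈ e.2, (item.map Prod.fst).Nodup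
instance (extracted : List (String × List (List (String × String)))) : Decidable (Pre_has_resume_detail_py extracted) := by unfold Pre_has_resume_detail_py; infer_instance

def pvWitness_has_resume_detail_py : (List (String × List (List (String × String)))) :=
  [("experience", [[("title", "Engineer")]]), ("education", [[("degree", "")]])]

def Spec_has_resume_detail_py (extracted : List (String × List (List (String × String)))) (out : Bool) : Prop := out = has_resume_detail_py_alt extracted
instance (extracted : List (String × List (List (String × String)))) (out : Bool) : Decidable (Spec_has_resume_detail_py extracted out) := by unfold Spec_has_resume_detail_py; infer_instance

-- ===== CLAIM (what is proved, stated in full; the proofs are below) =====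
def Claim_equal_has_resume_detail_py : Prop := ∀ (extracted : List (String × List (List (String × String)))), Dom_has_resume_detail_py extracted → Pre_has_resume_detail_py extracted → Spec_has_resume_detail_py extracted (has_resume_detail_py extracted)

-- ===== LEMMAS AND PROOFS =====

-- any respects a pointwise-on-members rewrite
theorem pvAnyCongr {α : Type} (l : List α) (f g : α → Bool)
    (h : ∀ x ∈ l, f x = g x) : l.any f = l.any g := by
  induction l with
  | nil => rfl
  | cons x t ih =>
    simp only [List.any_cons, h x (List.mem_cons_self ..),
      ih (fun y hy => h y (List.mem_cons_of_mem _ hy))]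

-- first-match lookup of a key equals a full scan when the item's keys are unique
theorem pvGetScan (item : List (String × String)) (k : String)
    (h : (item.map Prod.fst).Nodup) :
    pvTruthy ((PySem.Dict.mk item).get? k) = item.any (fun p => p.1 == k && !(p.2 == "")) := by
  induction item with
  | nil => rfl
  | cons q t ih =>
    simp only [List.map_cons, List.nodup_cons] at h
    rw [PySem.Dict.get?_mk_cons]
    by_cases hk : q.1 = k
    · subst hk
      simp only [beq_self_eq_true, if_true, List.any_cons, Bool.true_and]
      by_cases hv : q.2 = ""
      · have : t.any (fun p => p.1 == q.1 && !(p.2 == "")) = false := by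
          rw [List.any_eq_false]
          intro p hp
          have : p.1 ≠ q.1 := fun e => h.1 (e ▸ List.mem_map_of_mem hp)
          simp [this]
        simp [pvTruthy, hv, this]
      · simp [pvTruthy, hv]
    · rw [if_neg (by simp [hk] : ¬ (q.1 == k) = true)]
      simp only [List.any_cons]
      rw [(by simp [hk] : (q.1 == k && !(q.2 == "")) = false), Bool.false_or]
      exact ih h.2

-- distribute any over a pointwise disjunction
theorem pvAnyOr {α : Type} (l : List α) (f g : α → Bool) :
    (l.any f || l.any g) = l.any (fun x => f x || g x) := by
  induction l with
  | nil => rfl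
  | cons x t ih =>
    simp only [List.any_cons, ← ih]
    cases f x <;> cases g x <;> simp

-- A's three-probe test on one item = B's scan of the item's pairs (experience keys)
theorem pvItemExp (item : List (String × String)) (h : (item.map Prod.fst).Nodup) :
    (pvTruthy ((PySem.Dict.mk item).get? "title") || pvTruthy ((PySem.Dict.mk item).get? "company") || pvTruthy ((PySem.Dict.mk item).get? "description"))
      = item.any (fun p => (["title", "company", "description"] : List String).contains p.1 && !(p.2 == "")) := by
  rw [pvGetScan item "title" h, pvGetScan item "company" h, pvGetScan item "description" h,
      pvAnyOr, pvAnyOr]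
  apply pvAnyCongr
  intro p _
  by_cases h1 : p.1 = "title" <;> by_cases h2 : p.1 = "company" <;>
    by_cases h3 : p.1 = "description" <;> simp [h1, h2, h3]

-- same for the education keys
theorem pvItemEdu (item : List (String × String)) (h : (item.map Prod.fst).Nodup) :
    (pvTruthy ((PySem.Dict.mk item).get? "degree") || pvTruthy ((PySem.Dict.mk item).get? "school") || pvTruthy ((PySem.Dict.mk item).get? "field_of_study"))
      = item.any (fun p => (["degree", "school", "field_of_study"] : List String).contains p.1 && !(p.2 == "")) := by
  rw [pvGetScan item "degree" h, pvGetScan item "school" h, pvGetScan item "field_of_study" h,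
      pvAnyOr, pvAnyOr]
  apply pvAnyCongr
  intro p _
  by_cases h1 : p.1 = "degree" <;> by_cases h2 : p.1 = "school" <;>
    by_cases h3 : p.1 = "field_of_study" <;> simp [h1, h2, h3]

-- a key absent from the association list looks up to the default
theorem pvGetDNotMem (t : List (String × List (List (String × String)))) (k : String)
    (h : k ∉ t.map Prod.fst) :
    (PySem.Dict.mk t).getD k ([] : List (List (String × String))) = [] := by
  induction t with
  | nil => rfl
  | cons q r ih =>
    simp only [List.map_cons, List.mem_cons, not_or] at h
    rw [PySem.Dict.getD_eq_get?_getD, PySem.Dict.get?_mk_cons]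
    rw [if_neg (by simp [Ne.symm h.1] : ¬ (q.1 == k) = true)]
    rw [← PySem.Dict.getD_eq_get?_getD]
    exact ih h.2

-- a cons whose key differs passes the lookup through
theorem pvGetDCons (e : String × List (List (String × String)))
    (t : List (String × List (List (String × String)))) (k : String) (h : e.1 ≠ k) :
    (PySem.Dict.mk (e :: t)).getD k ([] : List (List (String × String)))
      = (PySem.Dict.mk t).getD k [] := by
  rw [PySem.Dict.getD_eq_get?_getD, PySem.Dict.get?_mk_cons,
      if_neg (by simp [h] : ¬ (e.1 == k) = true), ← PySem.Dict.getD_eq_get?_getD]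

-- the main equality, by induction over the association list
theorem pvMain : ∀ (extracted : List (String × List (List (String × String)))),
    (extracted.map Prod.fst).Nodup →
    (∀ e ∈ extracted, ∀ item ∈ e.2, (item.map Prod.fst).Nodup) →
    has_resume_detail_py extracted = has_resume_detail_py_alt extracted := by
  intro extracted
  induction extracted with
  | nil => intro _ _; rfl
  | cons e t ih =>
    intro hnd hinner
    simp only [List.map_cons, List.nodup_cons] at hnd
    have hih := ih hnd.2 (fun x hx => hinner x (List.mem_cons_of_mem _ hx))
    have hitems : ∀ item ∈ e.2, (item.map Prod.fst).Nodup :=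
      hinner e (List.mem_cons_self ..)
    simp only [has_resume_detail_py, has_resume_detail_py_alt, List.any_cons] at *
    by_cases hexp : e.1 = "experience"
    · have hget : pvWanted.get? e.1 = some ["title", "company", "description"] := by
        rw [hexp]; rfl
      rw [hget]
      have hDexp : (PySem.Dict.mk (e :: t)).getD "experience" [] = e.2 := by
        rw [PySem.Dict.getD_eq_get?_getD, PySem.Dict.get?_mk_cons]
        simp [hexp]
      rw [hDexp, pvGetDCons e t "education" (by rw [hexp]; decide),
          ← hih, pvGetDNotMem t "experience" (hexp ▸ hnd.1)]
      simp only [List.any_nil, Bool.false_or]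
      rw [pvAnyCongr e.2 _ _ (fun item hitem => pvItemExp item (hitems item hitem))]
    · by_cases hedu : e.1 = "education"
      · have hget : pvWanted.get? e.1 = some ["degree", "school", "field_of_study"] := by
          rw [hedu]; rfl
        rw [hget]
        have hDedu : (PySem.Dict.mk (e :: t)).getD "education" [] = e.2 := by
          rw [PySem.Dict.getD_eq_get?_getD, PySem.Dict.get?_mk_cons]
          simp [hedu]
        rw [hDedu, pvGetDCons e t "experience" (by rw [hedu]; decide),
            ← hih, pvGetDNotMem t "education" (hedu ▸ hnd.1)]
        simp only [List.any_nil, Bool.or_false]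
        rw [pvAnyCongr e.2 _ _ (fun item hitem => pvItemEdu item (hitems item hitem))]
        cases e.2.any (fun item => item.any (fun p => (["degree", "school", "field_of_study"] : List String).contains p.1 && !(p.2 == ""))) <;> simp
      · have hget : pvWanted.get? e.1 = none := by
          simp only [pvWanted, PySem.Dict.get?_mk_cons]
          rw [if_neg (by simp [Ne.symm hexp] : ¬ (("experience" : String) == e.1) = true),
              if_neg (by simp [Ne.symm hedu] : ¬ (("education" : String) == e.1) = true)]
          rfl
        rw [hget, pvGetDCons e t "experience" hexp, pvGetDCons e t "education" hedu, ← hih]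
        simp

-- ===== VERDICT (by name: the statement is the Claim_ definition above) =====
theorem has_resume_detail_py_spec : Claim_equal_has_resume_detail_py := by
  intro extracted _ hpre
  exact pvMain extracted hpre.1 hpre.2
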